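-- pv_equiv track=rewrite | github.com/MrBrantCode/unitest_baseline | mut_generate/mist_train_cf/cf_53141/solution.py | shiftOneNumber
-- ===== SOURCE A (Python) =====
-- def shiftOneNumber(arr):
--     """
--     This function takes an array of unique integers as input and returns the minimum number of right shift operations required
--     to sort the array according to positive and negative numbers (negatives first, followed by positives). If it is not possible
--     to sort the array through shifting, return -1. If the input array is empty, return 0.
--
--     Args:
--         arr (list): A list of unique integers.
--
--     Returns:
--         int: The minimum number of right shift operations required to sort the array.
--     """
--
--     if not arr:
--         return 0
--
--     negatives = sorted([num for num in arr if num < 0])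
--     positives = sorted([num for num in arr if num >= 0])
--     sorted_arr = negatives + positives
--
--     for i in range(len(arr)):
--         shifted_arr = arr[i:] + arr[:i]
--         if shifted_arr == sorted_arr:
--             return i
--
--     return -1
-- ===== SOURCE B (Python) =====
-- def shiftOneNumber(arr):
--     """O(n) single pass: a rotation of arr equals the sorted order iff arr has at
--     most one descent (adjacent pair arr[k] > arr[k+1]) and the wrap pair fits."""
--     n = len(arr)
--     if n == 0:
--         return 0
--     drop = -1
--     for k in range(n - 1):
--         if arr[k] > arr[k + 1]:
--             if drop != -1:
--                 return -1
--             drop = k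
--     if drop == -1:
--         return 0
--     if arr[n - 1] <= arr[0]:
--         return drop + 1
--     return -1
-- ===== Notes on version B (the rewrite author's own statement) =====
-- stated objective: faster
-- what changed: A builds each of the n rotations and compares it against a sorted copy (O(n^2)); B makes one pass counting adjacent descents: no descent means 0, exactly one descent at k with the last element not exceeding the first means k+1, anything else -1.
import Mathlib
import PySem

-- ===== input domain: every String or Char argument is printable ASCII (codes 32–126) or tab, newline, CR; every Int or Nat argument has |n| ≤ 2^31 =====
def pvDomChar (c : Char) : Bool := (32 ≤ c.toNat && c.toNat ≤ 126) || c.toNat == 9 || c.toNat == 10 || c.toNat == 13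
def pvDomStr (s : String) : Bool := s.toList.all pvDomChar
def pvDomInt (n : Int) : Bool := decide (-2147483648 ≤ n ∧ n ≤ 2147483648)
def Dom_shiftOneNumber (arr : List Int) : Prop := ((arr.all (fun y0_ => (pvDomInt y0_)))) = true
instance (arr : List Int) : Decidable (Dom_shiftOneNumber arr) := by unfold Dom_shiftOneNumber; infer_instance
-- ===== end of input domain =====

-- B replaces A's try-every-rotation-against-a-sort scan (O(n^2)) by a single pass
-- counting adjacent descents; objective: faster.


-- ===== PORT A =====
-- for i in range(len(arr)): shifted_arr = arr[i:] + arr[:i]; if shifted_arr == sorted_arr: return i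
def shiftLoopA (arr sorted_arr : List Int) : List Int → Int
  | [] => -1
  | i :: rest =>
    let shifted_arr := PySem.List.slice arr (some i) none ++ PySem.List.slice arr none (some i)
    if shifted_arr = sorted_arr then i else shiftLoopA arr sorted_arr rest

def shiftOneNumber (arr : List Int) : Int :=
  if arr = [] then 0
  else
    let negatives := PySem.List.sorted (arr.filter (fun num => decide (num < 0))) (fun x => x) false
    let positives := PySem.List.sorted (arr.filter (fun num => decide (num ≥ 0))) (fun x => x) false
    let sorted_arr := negatives ++ positives
    shiftLoopA arr sorted_arr (PySem.List.pyRange 0 (arr.length : Int) 1)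

-- ===== PORT B =====
-- for k in range(n-1): if arr[k] > arr[k+1]: (if drop != -1: return -1); drop = k
def dropScanB : List Int → Int → Int → Option Int
  | [], _, drop => some drop
  | [_], _, drop => some drop
  | x :: y :: rest, k, drop =>
    if x > y then
      if drop ≠ -1 then none
      else dropScanB (y :: rest) (k + 1) k
    else dropScanB (y :: rest) (k + 1) drop

def shiftOneNumber_alt (arr : List Int) : Int :=
  match arr with
  | [] => 0
  | a :: rest =>
    match dropScanB (a :: rest) 0 (-1) with
    | none => -1
    | some drop =>
      if drop = -1 then 0
      else if (a :: rest).getLast (by simp) ≤ a then drop + 1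
      else -1

-- ===== PRECONDITION & SPEC =====
def Spec_shiftOneNumber (arr : List Int) (out : Int) : Prop := out = shiftOneNumber_alt arr
instance (arr : List Int) (out : Int) : Decidable (Spec_shiftOneNumber arr out) := by unfold Spec_shiftOneNumber; infer_instance

-- ===== CLAIM (what is proved, stated in full; the proofs are below) =====
def Claim_equal_shiftOneNumber : Prop := ∀ (arr : List Int), Dom_shiftOneNumber arr → Spec_shiftOneNumber arr (shiftOneNumber arr)

-- ===== LEMMAS AND PROOFS =====

-- rotation arr[i:] + arr[:i], Nat index
def rotN (arr : List Int) (i : Nat) : List Int := arr.drop i ++ arr.take i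

-- the sorted target (= A's negatives ++ positives, lemma negpos_eq)
def SA (arr : List Int) : List Int := PySem.List.sorted arr (fun x => x) false

-- descent positions of arr
def descNat (arr : List Int) : List Nat :=
  (List.range (arr.length - 1)).filter (fun j => decide (arr.getD (j+1) 0 < arr.getD j 0))

-- "every adjacent pair is nondecreasing except possibly the pair broken at rotation point i"
def noDescExcept (arr : List Int) (i : Nat) : Prop :=
  ∀ k : Nat, k + 1 < arr.length → k + 1 ≠ i → arr.getD k 0 ≤ arr.getD (k+1) 0

lemma rot_perm (arr : List Int) (i : Nat) : (rotN arr i).Perm arr := by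
  unfold rotN
  exact (List.perm_append_comm).trans (by rw [List.take_append_drop])

lemma negpos_eq (arr : List Int) :
    PySem.List.sorted (arr.filter (fun num => decide (num < 0))) (fun x => x) false ++
      PySem.List.sorted (arr.filter (fun num => decide (num ≥ 0))) (fun x => x) false = SA arr := by
  unfold SA
  symm
  apply PySem.List.sorted_id_eq_of_perm_of_pairwise
  · refine ((PySem.List.sorted_perm _ _ _).append (PySem.List.sorted_perm _ _ _)).trans ?_
    have h : (fun num : Int => decide (num ≥ 0)) = (fun x : Int => !decide (x < 0)) := by
      funext x
      by_cases h : x < 0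
      · simp [h, not_le.mpr h]
      · simp [h, not_lt.mp h]
    rw [h]
    exact List.filter_append_perm _ arr
  · rw [List.pairwise_append]
    refine ⟨PySem.List.sorted_pairwise _ _, PySem.List.sorted_pairwise _ _, ?_⟩
    intro x hx y hy
    have hx' : x ∈ arr.filter (fun num => decide (num < 0)) := (PySem.List.mem_sorted _ _ _ _).mp hx
    have hy' : y ∈ arr.filter (fun num => decide (num ≥ 0)) := (PySem.List.mem_sorted _ _ _ _).mp hy
    simp only [List.mem_filter, decide_eq_true_eq] at hx' hy'
    omega

lemma rot_eq_iff (arr : List Int) (i : Nat) :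
    rotN arr i = SA arr ↔ List.IsChain (· ≤ ·) (rotN arr i) := by
  constructor
  · intro h; rw [h]
    exact List.isChain_iff_pairwise.mpr (PySem.List.sorted_pairwise _ _)
  · intro h
    symm
    exact PySem.List.sorted_id_eq_of_perm_of_pairwise _ _ (rot_perm arr i) (List.isChain_iff_pairwise.mp h)

lemma chain_iff_getD (l : List Int) :
    List.IsChain (· ≤ ·) l ↔ ∀ k : Nat, k + 1 < l.length → l.getD k 0 ≤ l.getD (k+1) 0 := by
  rw [List.isChain_iff_getElem]
  constructor
  · intro h k hk
    rw [List.getD_eq_getElem l 0 (by omega), List.getD_eq_getElem l 0 hk]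
    exact h k hk
  · intro h k hk
    have := h k hk
    rwa [List.getD_eq_getElem l 0 (by omega), List.getD_eq_getElem l 0 hk] at this

lemma mem_descNat (arr : List Int) (j : Nat) :
    j ∈ descNat arr ↔ j + 1 < arr.length ∧ arr.getD (j+1) 0 < arr.getD j 0 := by
  simp [descNat, List.mem_filter, List.mem_range]
  omega

lemma descNat_nil_iff (l : List Int) : descNat l = [] ↔ List.IsChain (· ≤ ·) l := by
  rw [chain_iff_getD, List.eq_nil_iff_forall_not_mem]
  constructor
  · intro h k hk
    have := h k
    rw [mem_descNat] at this
    omega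
  · intro h j hj
    rw [mem_descNat] at hj
    have := h j hj.1
    omega

lemma descNat_cons (x y : Int) (r : List Int) :
    descNat (x :: y :: r) =
      (if y < x then [0] else []) ++ (descNat (y :: r)).map (· + 1) := by
  have hlen : (x :: y :: r).length - 1 = r.length + 1 := by simp
  unfold descNat
  rw [hlen, List.range_succ_eq_map, List.filter_cons, List.filter_map]
  have h0 : (decide ((x :: y :: r).getD (0+1) 0 < (x :: y :: r).getD 0 0)) = decide (y < x) := by simp
  have hc : ((fun j => decide ((x :: y :: r).getD (j+1) 0 < (x :: y :: r).getD j 0)) ∘ Nat.succ) =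
      (fun j => decide ((y :: r).getD (j+1) 0 < (y :: r).getD j 0)) := by
    funext j; simp [Function.comp]
  have hl : (y :: r).length - 1 = r.length := by simp
  rw [hc, hl]
  have hmapeq : List.map Nat.succ = List.map (fun j : Nat => j + 1) := by
    funext l; congr 1
  rw [hmapeq]
  by_cases h : y < x <;> simp [h]

lemma dropScanB_flag : ∀ (l : List Int) (k d : Int), d ≠ -1 →
    dropScanB l k d = if List.IsChain (· ≤ ·) l then some d else none
  | [], k, d, hd => by simp [dropScanB]
  | [x], k, d, hd => by simp [dropScanB]
  | x :: y :: r, k, d, hd => by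
    rw [dropScanB]
    by_cases h : x > y
    · have : ¬ List.IsChain (· ≤ ·) (x :: y :: r) := by
        intro hc
        have := (List.isChain_cons_cons).mp hc
        omega
      simp [h, hd, this]
    · rw [if_neg h, dropScanB_flag (y :: r) (k+1) d hd]
      have heq : List.IsChain (· ≤ ·) (x :: y :: r) ↔ List.IsChain (· ≤ ·) (y :: r) := by
        rw [List.isChain_cons_cons]
        constructor
        · exact fun h => h.2
        · exact fun hc => ⟨by omega, hc⟩
      by_cases hc : List.IsChain (· ≤ ·) (y :: r)
      · rw [if_pos hc, if_pos (heq.mpr hc)]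
      · rw [if_neg hc, if_neg (fun h2 => hc (heq.mp h2))]

lemma dropScanB_main : ∀ (l : List Int) (c : Nat),
    dropScanB l (c : Int) (-1) =
      match descNat l with
      | [] => some (-1)
      | [p] => some ((p + c : Nat) : Int)
      | _ => none
  | [], c => by simp [dropScanB, descNat]
  | [x], c => by simp [dropScanB, descNat]
  | x :: y :: r, c => by
    rw [dropScanB, descNat_cons]
    by_cases h : x > y
    · rw [if_pos h, if_neg (by simp), if_pos h]
      rw [dropScanB_flag (y :: r) ((c:Int)+1) (c:Int) (by omega)]
      rcases hd : descNat (y :: r) with _ | ⟨p, t⟩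
      · rw [if_pos ((descNat_nil_iff _).mp hd)]
        simp
      · rw [if_neg (fun hc => by rw [(descNat_nil_iff _).mpr hc] at hd; cases hd)]
        simp
    · rw [if_neg h, if_neg h]
      have : ((c : Int) + 1) = ((c + 1 : Nat) : Int) := by push_cast; ring
      rw [this, dropScanB_main (y :: r) (c+1)]
      rcases hd : descNat (y :: r) with _ | ⟨p, _ | ⟨q, t⟩⟩ <;> simp [Nat.add_assoc, Nat.add_comm 1 c]

lemma getD_drop (arr : List Int) (i j : Nat) (h : j < (arr.drop i).length) :
    (arr.drop i).getD j 0 = arr.getD (i+j) 0 := by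
  rw [List.getD_eq_getElem _ 0 h, List.getD_eq_getElem _ 0 (by simp at h; omega)]
  exact List.getElem_drop

lemma getD_take (arr : List Int) (i j : Nat) (h : j < (arr.take i).length) :
    (arr.take i).getD j 0 = arr.getD j 0 := by
  rw [List.getD_eq_getElem _ 0 h, List.getD_eq_getElem _ 0 (by simp at h; omega)]
  exact List.getElem_take

lemma chain_rot_iff (arr : List Int) (i : Nat) (hi : i < arr.length) :
    List.IsChain (· ≤ ·) (rotN arr i) ↔
      noDescExcept arr i ∧ (i = 0 ∨ arr.getD (arr.length - 1) 0 ≤ arr.getD 0 0) := by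
  rcases Nat.eq_zero_or_pos i with h0 | hpos
  · subst h0
    simp only [rotN, List.drop_zero, List.take_zero, List.append_nil]
    rw [chain_iff_getD]
    unfold noDescExcept
    constructor
    · exact fun h => ⟨fun k hk _ => h k hk, Or.inl (by trivial)⟩
    · exact fun h k hk => h.1 k hk (by omega)
  · -- 0 < i < n : both parts nonempty
    have hdl : (arr.drop i).length = arr.length - i := by simp
    have htl : (arr.take i).length = i := by simp; omega
    have hdne : arr.drop i ≠ [] := by
      intro h; rw [← List.length_eq_zero_iff] at h; omega
    have htne : arr.take i ≠ [] := by
      intro h; rw [← List.length_eq_zero_iff] at h; omega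
    rw [rotN, List.isChain_append]
    have hlast : (arr.drop i).getLast? = some (arr.getD (arr.length - 1) 0) := by
      rw [List.getLast?_eq_getElem?, List.getElem?_drop]
      simp only [List.length_drop]
      have e : i + (arr.length - i - 1) = arr.length - 1 := by omega
      rw [e, List.getElem?_eq_getElem (by omega), List.getD_eq_getElem _ 0 (by omega)]
    have hhead : (arr.take i).head? = some (arr.getD 0 0) := by
      rw [List.head?_eq_getElem?, List.getElem?_eq_getElem (by omega)]
      congr 1
      rw [List.getD_eq_getElem _ 0 (by omega)]
      exact List.getElem_take
    rw [hlast, hhead, chain_iff_getD, chain_iff_getD]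
    constructor
    · rintro ⟨hd, ht, hcross⟩
      refine ⟨?_, Or.inr (hcross _ rfl _ rfl)⟩
      intro k hk hki
      by_cases hlt : k + 1 < i
      · have := ht k (by omega)
        rwa [getD_take _ _ _ (by omega), getD_take _ _ _ (by omega)] at this
      · -- k ≥ i
        have hik : i ≤ k := by omega
        have := hd (k - i) (by omega)
        rw [getD_drop _ _ _ (by omega), getD_drop _ _ _ (by omega)] at this
        have e1 : i + (k - i) = k := by omega
        have e2 : i + (k - i + 1) = k + 1 := by omega
        rwa [e1, e2] at this
    · rintro ⟨hnd, hw⟩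
      have hw' : arr.getD (arr.length - 1) 0 ≤ arr.getD 0 0 := by
        rcases hw with h | h
        · omega
        · exact h
      refine ⟨?_, ?_, ?_⟩
      · intro j hj
        rw [getD_drop _ _ _ (by omega), getD_drop _ _ _ (by omega)]
        have e : i + (j + 1) = (i + j) + 1 := by omega
        rw [e]
        exact hnd (i + j) (by omega) (by omega)
      · intro j hj
        rw [getD_take _ _ _ (by omega), getD_take _ _ _ (by omega)]
        exact hnd j (by omega) (by omega)
      · intro x hx y hy
        rw [Option.mem_def] at hx hy
        obtain rfl : arr.getD (arr.length - 1) 0 = x := Option.some_injective _ hx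
        obtain rfl : arr.getD 0 0 = y := Option.some_injective _ hy
        exact hw'

lemma slice_rot (arr : List Int) (j : Nat) :
    PySem.List.slice arr (some (j : Int)) none ++ PySem.List.slice arr none (some (j : Int)) =
      rotN arr j := by
  simp [rotN, PySem.List.slice_from_natCast, PySem.List.slice_to_natCast]

lemma loop_found (arr S : List Int) : ∀ (d a i : Nat), i - a = d → a ≤ i → i < arr.length →
    rotN arr i = S → (∀ j : Nat, a ≤ j → j < i → rotN arr j ≠ S) →
    shiftLoopA arr S (PySem.List.pyRange (a : Int) (arr.length : Int) 1) = (i : Int) := by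
  intro d
  induction d with
  | zero =>
    intro a i hd ha hi hrot _
    have : a = i := by omega
    subst this
    rw [PySem.List.pyRange_one_cons (by exact_mod_cast hi), shiftLoopA]
    have hrot' : List.drop a arr ++ List.take a arr = S := hrot
    simp [hrot']
  | succ m ih =>
    intro a i hd ha hi hrot hmin
    have hai : a < i := by omega
    rw [PySem.List.pyRange_one_cons (by exact_mod_cast (by omega : a < arr.length)), shiftLoopA]
    rw [slice_rot]
    rw [if_neg (hmin a le_rfl hai)]
    have e : ((a : Int) + 1) = ((a + 1 : Nat) : Int) := by push_cast; ring
    rw [e]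
    exact ih (a+1) i (by omega) (by omega) hi hrot (fun j hj hji => hmin j (by omega) hji)

lemma loop_none (arr S : List Int) : ∀ (m a : Nat), arr.length - a = m →
    (∀ j : Nat, a ≤ j → j < arr.length → rotN arr j ≠ S) →
    shiftLoopA arr S (PySem.List.pyRange (a : Int) (arr.length : Int) 1) = -1 := by
  intro m
  induction m with
  | zero =>
    intro a hm _
    rw [PySem.List.pyRange_one]
    have : ((arr.length : Int) - a).toNat = 0 := by omega
    rw [this]
    rfl
  | succ m ih =>
    intro a hm hno
    rw [PySem.List.pyRange_one_cons (by omega : (a : Int) < arr.length), shiftLoopA]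
    rw [slice_rot]
    rw [if_neg (hno a le_rfl (by omega))]
    have e : ((a : Int) + 1) = ((a + 1 : Nat) : Int) := by push_cast; ring
    rw [e]
    exact ih (a+1) (by omega) (fun j hj hjn => hno j (by omega) hjn)

-- ===== VERDICT (by name: the statement is the Claim_ definition above) =====
theorem shiftOneNumber_spec : Claim_equal_shiftOneNumber := by
  intro arr _
  unfold Spec_shiftOneNumber
  cases arr with
  | nil => rfl
  | cons a rest =>
    have hlen : 0 < (a :: rest).length := by simp
    -- A's computation in terms of SA
    have hA : shiftOneNumber (a :: rest) =
        shiftLoopA (a :: rest) (SA (a :: rest))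
          (PySem.List.pyRange (((0:Nat) : Int)) (((a :: rest).length : Nat) : Int) 1) := by
      rw [shiftOneNumber, if_neg (by simp)]
      show shiftLoopA (a :: rest) (_ ++ _) _ = _
      rw [negpos_eq]
      norm_num
    have hlast : (a :: rest).getLast (by simp) = (a :: rest).getD ((a :: rest).length - 1) 0 := by
      rw [List.getLast_eq_getElem, List.getD_eq_getElem _ 0 (by simp)]
      rfl
    have hmain := dropScanB_main (a :: rest) 0
    simp only [Nat.cast_zero, Nat.add_zero] at hmain
    rcases hd : descNat (a :: rest) with _ | ⟨p, _ | ⟨q, t⟩⟩ <;> rw [hd] at hmain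
    · -- no descent: answer 0
      have hB : shiftOneNumber_alt (a :: rest) = 0 := by
        simp [shiftOneNumber_alt, hmain]
      rw [hA, hB]
      have hchain : List.IsChain (· ≤ ·) (a :: rest) := (descNat_nil_iff _).mp hd
      have hrot0 : rotN (a :: rest) 0 = (a :: rest) := by simp [rotN]
      have hr : rotN (a :: rest) 0 = SA (a :: rest) :=
        (rot_eq_iff _ _).mpr (by rwa [hrot0])
      rw [loop_found (a :: rest) (SA (a :: rest)) 0 0 0 rfl le_rfl hlen hr
        (fun j hj hji => by omega)]
      rfl
    · -- exactly one descent at p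
      have hB : shiftOneNumber_alt (a :: rest) =
          (if (a :: rest).getD ((a :: rest).length - 1) 0 ≤ (a :: rest).getD 0 0
            then ((p : Int) + 1) else -1) := by
        simp only [shiftOneNumber_alt, hmain]
        have hp : ((p : Nat) : Int) ≠ -1 := by omega
        rw [if_neg hp, hlast]
        rfl
      rw [hA, hB]
      have hpmem : p ∈ descNat (a :: rest) := by rw [hd]; simp
      rw [mem_descNat] at hpmem
      obtain ⟨hp1, hpdesc⟩ := hpmem
      have honly : ∀ k : Nat, k ∈ descNat (a :: rest) → k = p := by
        intro k hk; rw [hd] at hk; simpa using hk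
      have hnde : ∀ i : Nat, noDescExcept (a :: rest) i → i = p + 1 := by
        intro i hi
        by_contra hne
        have := hi p hp1 (by omega)
        omega
      by_cases hw : (a :: rest).getD ((a :: rest).length - 1) 0 ≤ (a :: rest).getD 0 0
      · -- wrap ok: answer p+1
        rw [if_pos hw]
        have hr : rotN (a :: rest) (p+1) = SA (a :: rest) := by
          rw [rot_eq_iff, chain_rot_iff _ _ (by omega)]
          refine ⟨?_, Or.inr hw⟩
          intro k hk hki
          by_contra hlt
          have hkmem : k ∈ descNat (a :: rest) := (mem_descNat _ _).mpr ⟨hk, by omega⟩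
          have := honly k hkmem
          omega
        have hmin : ∀ j : Nat, 0 ≤ j → j < p + 1 → rotN (a :: rest) j ≠ SA (a :: rest) := by
          intro j _ hj hcontra
          have hch := (chain_rot_iff _ _ (by omega)).mp ((rot_eq_iff _ _).mp hcontra)
          have := hnde j hch.1
          omega
        rw [loop_found (a :: rest) (SA (a :: rest)) (p+1) 0 (p+1) rfl (by omega) (by omega) hr hmin]
        push_cast
        ring
      · -- wrap fails: answer -1
        rw [if_neg hw]
        refine loop_none (a :: rest) (SA (a :: rest)) (a :: rest).length 0 rfl ?_
        intro j _ hj hcontra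
        have hch := (chain_rot_iff _ _ hj).mp ((rot_eq_iff _ _).mp hcontra)
        rcases hch.2 with h0 | hwp
        · subst h0
          have := hch.1 p hp1 (by omega)
          omega
        · exact hw hwp
    · -- two or more descents: answer -1
      have hB : shiftOneNumber_alt (a :: rest) = -1 := by
        simp [shiftOneNumber_alt, hmain]
      rw [hA, hB]
      have hpmem : p ∈ descNat (a :: rest) := by rw [hd]; simp
      have hqmem : q ∈ descNat (a :: rest) := by rw [hd]; simp
      have hnodup : (descNat (a :: rest)).Nodup := List.Nodup.filter _ (List.nodup_range)
      have hpq : p ≠ q := by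
        rw [hd] at hnodup
        intro h; subst h
        simp at hnodup
      rw [mem_descNat] at hpmem hqmem
      refine loop_none (a :: rest) (SA (a :: rest)) (a :: rest).length 0 rfl ?_
      intro j _ hj hcontra
      have hch := (chain_rot_iff _ _ hj).mp ((rot_eq_iff _ _).mp hcontra)
      have h1 : ¬ (p + 1 ≠ j) := fun h => by have := hch.1 p hpmem.1 h; omega
      have h2 : ¬ (q + 1 ≠ j) := fun h => by have := hch.1 q hqmem.1 h; omega
      omega
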